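-- pv_equiv track=rewrite | github.com/neitzal/asi-tasks | tasks/rr/room_runner.py | find_adjacent_cells
-- ===== SOURCE A (Python) =====
-- def find_adjacent_cells(from_y, from_x, from_h, from_w,
--                         to_y, to_x, to_h, to_w):
--     dx = to_x - from_x
--     dy = to_y - from_y
--
--     if dx == from_w:
--         return [(y, from_x + from_w - 1,
--                  0,  # dy
--                  1  # dx
--                  )
--                 for y in range(max(from_y, to_y),
--                                min(from_y + from_h, to_y + to_h))]
--     elif dx == -to_w:
--         return [(y, from_x,
--                  0,  # dy
--                  -1  # dx
--                  )
--                 for y in range(max(from_y, to_y),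
--                                min(from_y + from_h, to_y + to_h))]
--     elif dy == from_h:
--         return [(from_y + from_h - 1, x,
--                  1,  # dy
--                  0  # dx
--                  )
--                 for x in range(max(from_x, to_x),
--                                min(from_x + from_w, to_x + to_w))]
--     elif dy == -to_h:
--         return [(from_y, x,
--                  -1,  # dy
--                  0  # dx
--                  )
--                 for x in range(max(from_x, to_x),
--                                min(from_x + from_w, to_x + to_w))]
--     else:
--         raise ValueError('Rooms are not adjacent')
-- ===== SOURCE B (Python) =====
-- def find_adjacent_cells(from_y, from_x, from_h, from_w,
--                         to_y, to_x, to_h, to_w):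
--     # Validate adjacency, then geometrically scan the from-room: keep every
--     # cell whose orthogonal neighbour lies inside the to-room, with its step.
--     if not (to_x - from_x == from_w or to_x - from_x == -to_w
--             or to_y - from_y == from_h or to_y - from_y == -to_h):
--         raise ValueError('Rooms are not adjacent')
--     cells = []
--     for y in range(from_y, from_y + from_h):
--         for x in range(from_x, from_x + from_w):
--             for dy, dx in ((0, 1), (0, -1), (1, 0), (-1, 0)):
--                 if (to_y <= y + dy < to_y + to_h
--                         and to_x <= x + dx < to_x + to_w):
--                     cells.append((y, x, dy, dx))
--     return cells
-- ===== Notes on version B (the rewrite author's own statement) =====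
-- stated objective: alternative
-- what changed: B replaces A's four direction-specific range-overlap comprehensions by a geometric cell scan: it walks every cell of the from-room and emits the cell with its step whenever an orthogonal neighbour lies inside the to-room; this trades A's O(k) overlap arithmetic for an O(h*w) scan.
-- intended difference: On degenerate rooms (some non-positive dimension) whose selected overlap interval is nonempty, A returns 'boundary' cells of an empty room that lie outside any room (e.g. column from_x-1 for a zero-width room); B returns [], the intended value since a room with no area has no boundary cells. — e.g. on find_adjacent_cells(0, 0, 3, 0, 0, 0, 3, 2): A returns [(0, -1, 0, 1), (1, -1, 0, 1), (2, -1, 0, 1)], B returns []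
import Mathlib
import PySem

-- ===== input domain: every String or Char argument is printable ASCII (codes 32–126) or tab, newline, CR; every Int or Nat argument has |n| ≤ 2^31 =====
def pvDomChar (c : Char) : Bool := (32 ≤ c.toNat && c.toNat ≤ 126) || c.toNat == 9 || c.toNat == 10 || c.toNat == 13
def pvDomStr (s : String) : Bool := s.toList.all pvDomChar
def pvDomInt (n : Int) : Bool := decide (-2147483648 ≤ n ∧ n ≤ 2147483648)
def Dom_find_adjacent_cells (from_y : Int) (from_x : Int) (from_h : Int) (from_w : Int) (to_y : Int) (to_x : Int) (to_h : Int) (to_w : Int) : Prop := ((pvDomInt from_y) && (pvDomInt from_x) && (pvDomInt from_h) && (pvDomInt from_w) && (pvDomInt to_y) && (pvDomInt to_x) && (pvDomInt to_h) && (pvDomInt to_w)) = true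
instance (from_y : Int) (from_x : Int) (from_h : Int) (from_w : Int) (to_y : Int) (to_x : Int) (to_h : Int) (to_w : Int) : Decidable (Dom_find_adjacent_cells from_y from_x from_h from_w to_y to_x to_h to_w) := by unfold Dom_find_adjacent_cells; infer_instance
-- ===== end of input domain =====

-- B replaces A's four direction-specific overlap-range comprehensions by a geometric cell scan
-- (walk the from-room, keep cells with an orthogonal neighbour in the to-room); equality is proved
-- on Pre_ (adjacent rooms) outside D_ (degenerate rooms where A emits cells of an empty room).

-- ===== PORT A =====
def find_adjacent_cells (from_y : Int) (from_x : Int) (from_h : Int) (from_w : Int) (to_y : Int) (to_x : Int) (to_h : Int) (to_w : Int) : List (Int × Int × Int × Int) :=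
  let dx := to_x - from_x
  let dy := to_y - from_y
  if dx = from_w then
    (PySem.List.pyRange (max from_y to_y) (min (from_y + from_h) (to_y + to_h)) 1).map
      (fun y => (y, from_x + from_w - 1, 0, 1))
  else if dx = -to_w then
    (PySem.List.pyRange (max from_y to_y) (min (from_y + from_h) (to_y + to_h)) 1).map
      (fun y => (y, from_x, 0, -1))
  else if dy = from_h then
    (PySem.List.pyRange (max from_x to_x) (min (from_x + from_w) (to_x + to_w)) 1).map
      (fun x => (from_y + from_h - 1, x, 1, 0))
  else if dy = -to_h then
    (PySem.List.pyRange (max from_x to_x) (min (from_x + from_w) (to_x + to_w)) 1).map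
      (fun x => (from_y, x, -1, 0))
  else []  -- raise ValueError('Rooms are not adjacent'); excluded by Pre_

-- ===== PORT B =====
def find_adjacent_cells_alt (from_y : Int) (from_x : Int) (from_h : Int) (from_w : Int) (to_y : Int) (to_x : Int) (to_h : Int) (to_w : Int) : List (Int × Int × Int × Int) :=
  if ¬ (to_x - from_x = from_w ∨ to_x - from_x = -to_w ∨
        to_y - from_y = from_h ∨ to_y - from_y = -to_h) then
    []  -- raise ValueError('Rooms are not adjacent'); excluded by Pre_
  else
  (PySem.List.pyRange from_y (from_y + from_h) 1).foldl (fun cells y =>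
    (PySem.List.pyRange from_x (from_x + from_w) 1).foldl (fun cells x =>
      ([((0 : Int), (1 : Int)), (0, -1), (1, 0), (-1, 0)]).foldl (fun cells d =>
        if to_y ≤ y + d.1 ∧ y + d.1 < to_y + to_h ∧ to_x ≤ x + d.2 ∧ x + d.2 < to_x + to_w then
          cells ++ [(y, x, d.1, d.2)]
        else cells) cells) cells) []

-- ===== PRECONDITION & SPEC =====
-- Pre_ excludes exactly the non-adjacent room pairs, on which A raises ValueError.
def Pre_find_adjacent_cells (from_y : Int) (from_x : Int) (from_h : Int) (from_w : Int) (to_y : Int) (to_x : Int) (to_h : Int) (to_w : Int) : Prop :=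
  to_x - from_x = from_w ∨ to_x - from_x = -to_w ∨ to_y - from_y = from_h ∨ to_y - from_y = -to_h
instance (from_y : Int) (from_x : Int) (from_h : Int) (from_w : Int) (to_y : Int) (to_x : Int) (to_h : Int) (to_w : Int) : Decidable (Pre_find_adjacent_cells from_y from_x from_h from_w to_y to_x to_h to_w) := by unfold Pre_find_adjacent_cells; infer_instance
def pvWitness_find_adjacent_cells : Int × Int × Int × Int × Int × Int × Int × Int := (0, 0, 3, 4, 1, 4, 2, 5)

-- On degenerate rooms (some non-positive dimension) whose selected overlap interval is nonempty,
-- A returns "boundary" cells of an empty room (cells lying outside any room); B returns [], the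
-- intended value since a room with no area has no boundary cells.
def D_find_adjacent_cells (from_y : Int) (from_x : Int) (from_h : Int) (from_w : Int) (to_y : Int) (to_x : Int) (to_h : Int) (to_w : Int) : Prop :=
  if to_x = from_x + from_w ∨ from_x = to_x + to_w then
    min from_w to_w ≤ 0 ∧ 0 < min from_h to_h ∧ from_y < to_y + to_h ∧ to_y < from_y + from_h
  else
    min from_h to_h ≤ 0 ∧ 0 < min from_w to_w ∧ from_x < to_x + to_w ∧ to_x < from_x + from_w
instance (from_y : Int) (from_x : Int) (from_h : Int) (from_w : Int) (to_y : Int) (to_x : Int) (to_h : Int) (to_w : Int) : Decidable (D_find_adjacent_cells from_y from_x from_h from_w to_y to_x to_h to_w) := by unfold D_find_adjacent_cells; infer_instance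

def Spec_find_adjacent_cells (from_y : Int) (from_x : Int) (from_h : Int) (from_w : Int) (to_y : Int) (to_x : Int) (to_h : Int) (to_w : Int) (out : List (Int × Int × Int × Int)) : Prop := ¬ D_find_adjacent_cells from_y from_x from_h from_w to_y to_x to_h to_w → out = find_adjacent_cells_alt from_y from_x from_h from_w to_y to_x to_h to_w
instance (from_y : Int) (from_x : Int) (from_h : Int) (from_w : Int) (to_y : Int) (to_x : Int) (to_h : Int) (to_w : Int) (out : List (Int × Int × Int × Int)) : Decidable (Spec_find_adjacent_cells from_y from_x from_h from_w to_y to_x to_h to_w out) := by unfold Spec_find_adjacent_cells; infer_instance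

def pvDiffWitness_find_adjacent_cells : Int × Int × Int × Int × Int × Int × Int × Int := (0, 0, 3, 0, 0, 0, 3, 2)
def pvDiffWitnessOut_find_adjacent_cells : (List (Int × Int × Int × Int)) × (List (Int × Int × Int × Int)) := ([(0, -1, 0, 1), (1, -1, 0, 1), (2, -1, 0, 1)], [])

-- ===== CLAIM (what is proved, stated in full; the proofs are below) =====
def Claim_unchanged_find_adjacent_cells : Prop := ∀ (from_y : Int) (from_x : Int) (from_h : Int) (from_w : Int) (to_y : Int) (to_x : Int) (to_h : Int) (to_w : Int), Dom_find_adjacent_cells from_y from_x from_h from_w to_y to_x to_h to_w → Pre_find_adjacent_cells from_y from_x from_h from_w to_y to_x to_h to_w → Spec_find_adjacent_cells from_y from_x from_h from_w to_y to_x to_h to_w (find_adjacent_cells from_y from_x from_h from_w to_y to_x to_h to_w)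
def Claim_changed_find_adjacent_cells : Prop := Dom_find_adjacent_cells (pvDiffWitness_find_adjacent_cells.1) (pvDiffWitness_find_adjacent_cells.2.1) (pvDiffWitness_find_adjacent_cells.2.2.1) (pvDiffWitness_find_adjacent_cells.2.2.2.1) (pvDiffWitness_find_adjacent_cells.2.2.2.2.1) (pvDiffWitness_find_adjacent_cells.2.2.2.2.2.1) (pvDiffWitness_find_adjacent_cells.2.2.2.2.2.2.1) (pvDiffWitness_find_adjacent_cells.2.2.2.2.2.2.2) ∧ Pre_find_adjacent_cells (pvDiffWitness_find_adjacent_cells.1) (pvDiffWitness_find_adjacent_cells.2.1) (pvDiffWitness_find_adjacent_cells.2.2.1) (pvDiffWitness_find_adjacent_cells.2.2.2.1) (pvDiffWitness_find_adjacent_cells.2.2.2.2.1) (pvDiffWitness_find_adjacent_cells.2.2.2.2.2.1) (pvDiffWitness_find_adjacent_cells.2.2.2.2.2.2.1) (pvDiffWitness_find_adjacent_cells.2.2.2.2.2.2.2) ∧ D_find_adjacent_cells (pvDiffWitness_find_adjacent_cells.1) (pvDiffWitness_find_adjacent_cells.2.1) (pvDiffWitness_find_adjacent_cells.2.2.1)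 (pvDiffWitness_find_adjacent_cells.2.2.2.1) (pvDiffWitness_find_adjacent_cells.2.2.2.2.1) (pvDiffWitness_find_adjacent_cells.2.2.2.2.2.1) (pvDiffWitness_find_adjacent_cells.2.2.2.2.2.2.1) (pvDiffWitness_find_adjacent_cells.2.2.2.2.2.2.2) ∧ find_adjacent_cells (pvDiffWitness_find_adjacent_cells.1) (pvDiffWitness_find_adjacent_cells.2.1) (pvDiffWitness_find_adjacent_cells.2.2.1) (pvDiffWitness_find_adjacent_cells.2.2.2.1) (pvDiffWitness_find_adjacent_cells.2.2.2.2.1) (pvDiffWitness_find_adjacent_cells.2.2.2.2.2.1) (pvDiffWitness_find_adjacent_cells.2.2.2.2.2.2.1) (pvDiffWitness_find_adjacent_cells.2.2.2.2.2.2.2) = pvDiffWitnessOut_find_adjacent_cells.1 ∧ find_adjacent_cells_alt (pvDiffWitness_find_adjacent_cells.1) (pvDiffWitness_find_adjacent_cells.2.1) (pvDiffWitness_find_adjacent_cells.2.2.1) (pvDiffWitness_find_adjacent_cells.2.2.2.1) (pvDiffWitness_find_adjacent_cells.2.2.2.2.1) (pvDiffWitness_find_adjacent_cells.2.2.2.2.2.1)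 (pvDiffWitness_find_adjacent_cells.2.2.2.2.2.2.1) (pvDiffWitness_find_adjacent_cells.2.2.2.2.2.2.2) = pvDiffWitnessOut_find_adjacent_cells.2 ∧ pvDiffWitnessOut_find_adjacent_cells.1 ≠ pvDiffWitnessOut_find_adjacent_cells.2
def Claim_exact_find_adjacent_cells : Prop := ∀ (from_y : Int) (from_x : Int) (from_h : Int) (from_w : Int) (to_y : Int) (to_x : Int) (to_h : Int) (to_w : Int), Dom_find_adjacent_cells from_y from_x from_h from_w to_y to_x to_h to_w → Pre_find_adjacent_cells from_y from_x from_h from_w to_y to_x to_h to_w → D_find_adjacent_cells from_y from_x from_h from_w to_y to_x to_h to_w → find_adjacent_cells from_y from_x from_h from_w to_y to_x to_h to_w ≠ find_adjacent_cells_alt from_y from_x from_h from_w to_y to_x to_h to_w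

-- ===== LEMMAS AND PROOFS =====

-- what one cell of the from-room contributes in B's scan (conditions in the folded shape)
def pvEmit (to_y to_x to_h to_w y x : Int) : List (Int × Int × Int × Int) :=
  (if to_y ≤ y + 0 ∧ y + 0 < to_y + to_h ∧ to_x ≤ x + 1 ∧ x + 1 < to_x + to_w then [(y, x, (0 : Int), (1 : Int))] else [])
  ++ ((if to_y ≤ y + 0 ∧ y + 0 < to_y + to_h ∧ to_x ≤ x + -1 ∧ x + -1 < to_x + to_w then [(y, x, (0 : Int), (-1 : Int))] else [])
  ++ ((if to_y ≤ y + 1 ∧ y + 1 < to_y + to_h ∧ to_x ≤ x + 0 ∧ x + 0 < to_x + to_w then [(y, x, (1 : Int), (0 : Int))] else [])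
  ++ (if to_y ≤ y + -1 ∧ y + -1 < to_y + to_h ∧ to_x ≤ x + 0 ∧ x + 0 < to_x + to_w then [(y, x, (-1 : Int), (0 : Int))] else [])))

lemma alt_eq_flatMap (from_y from_x from_h from_w to_y to_x to_h to_w : Int)
    (hadj : to_x - from_x = from_w ∨ to_x - from_x = -to_w ∨
            to_y - from_y = from_h ∨ to_y - from_y = -to_h) :
    find_adjacent_cells_alt from_y from_x from_h from_w to_y to_x to_h to_w =
      (PySem.List.pyRange from_y (from_y + from_h) 1).flatMap (fun y =>
        (PySem.List.pyRange from_x (from_x + from_w) 1).flatMap (fun x =>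
          pvEmit to_y to_x to_h to_w y x)) := by
  unfold find_adjacent_cells_alt
  rw [if_neg (not_not_intro hadj)]
  have hdir : ∀ (y x : Int) (cells : List (Int × Int × Int × Int)),
      ([((0 : Int), (1 : Int)), (0, -1), (1, 0), (-1, 0)]).foldl (fun cells d =>
        if to_y ≤ y + d.1 ∧ y + d.1 < to_y + to_h ∧ to_x ≤ x + d.2 ∧ x + d.2 < to_x + to_w then
          cells ++ [(y, x, d.1, d.2)]
        else cells) cells = cells ++ pvEmit to_y to_x to_h to_w y x := by
    intro y x cells
    simp only [List.foldl, pvEmit]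
    split_ifs <;> simp
  have hx : ∀ (y : Int) (cells : List (Int × Int × Int × Int)),
      (PySem.List.pyRange from_x (from_x + from_w) 1).foldl (fun cells x =>
        ([((0 : Int), (1 : Int)), (0, -1), (1, 0), (-1, 0)]).foldl (fun cells d =>
          if to_y ≤ y + d.1 ∧ y + d.1 < to_y + to_h ∧ to_x ≤ x + d.2 ∧ x + d.2 < to_x + to_w then
            cells ++ [(y, x, d.1, d.2)]
          else cells) cells) cells
      = cells ++ (PySem.List.pyRange from_x (from_x + from_w) 1).flatMap (fun x =>
          pvEmit to_y to_x to_h to_w y x) := by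
    intro y cells
    exact (PySem.List.foldl_congr_mem _ _ _ _ (fun acc x _ => hdir y x acc)).trans
      (PySem.List.foldl_append_eq_flatMap _ _ _)
  exact (PySem.List.foldl_congr_mem _ _ _ _ (fun acc y _ => hx y acc)).trans
    ((PySem.List.foldl_append_eq_flatMap _ _ _).trans (List.nil_append _))

lemma flatMap_ite_singleton {α β : Type} (p : α → Prop) [DecidablePred p] (f : α → β) (l : List α) :
    l.flatMap (fun y => if p y then [f y] else []) = (l.filter (fun y => decide (p y))).map f := by
  induction l with
  | nil => rfl
  | cons a t ih =>
    simp only [List.flatMap_cons, List.filter_cons, ih]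
    by_cases h : p a <;> simp [h]

lemma filter_pyRange (a b c d : Int) :
    (PySem.List.pyRange a b 1).filter (fun y => decide (c ≤ y ∧ y < d)) =
      PySem.List.pyRange (max a c) (min b d) 1 := by
  have hperm : List.Perm ((PySem.List.pyRange a b 1).filter (fun y => decide (c ≤ y ∧ y < d)))
      (PySem.List.pyRange (max a c) (min b d) 1) := by
    rw [List.perm_ext_iff_of_nodup
      ((PySem.List.nodup_pyRange_one a b).filter _) (PySem.List.nodup_pyRange_one _ _)]
    intro z
    simp only [List.mem_filter, PySem.List.mem_pyRange_one, decide_eq_true_eq]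
    omega
  refine hperm.eq_of_pairwise ?_ ((PySem.List.pairwise_lt_pyRange_one a b).filter _)
    (PySem.List.pairwise_lt_pyRange_one _ _)
  intro x y _ _ h1 h2
  omega

-- on positive-sized adjacent rooms the two ports agree
lemma eq_of_pos (fy fx fh fw ty tx th tw : Int)
    (hadj : tx - fx = fw ∨ tx - fx = -tw ∨ ty - fy = fh ∨ ty - fy = -th)
    (hfh : 1 ≤ fh) (hfw : 1 ≤ fw) (hth : 1 ≤ th) (htw : 1 ≤ tw) :
    find_adjacent_cells fy fx fh fw ty tx th tw = find_adjacent_cells_alt fy fx fh fw ty tx th tw := by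
  unfold find_adjacent_cells
  rw [alt_eq_flatMap _ _ _ _ _ _ _ _ hadj]
  dsimp only
  split_ifs with h1 h2 h3 h4
  · -- to-room to the right: only direction (0,1) at column fx+fw-1 fires
    have hsplit : PySem.List.pyRange fx (fx + fw) 1
        = PySem.List.pyRange fx (fx + fw - 1) 1 ++ [fx + fw - 1] := by
      have h := PySem.List.pyRange_one_succ_right (a := fx) (b := fx + fw - 1) (by omega)
      have e : fx + fw - 1 + 1 = fx + fw := by ring
      rwa [e] at h
    have hinner : ∀ y : Int, (PySem.List.pyRange fx (fx + fw) 1).flatMap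
        (fun x => pvEmit ty tx th tw y x)
        = if ty ≤ y ∧ y < ty + th then [(y, fx + fw - 1, (0 : Int), (1 : Int))] else [] := by
      intro y
      rw [hsplit, List.flatMap_append]
      have hz : (PySem.List.pyRange fx (fx + fw - 1) 1).flatMap
          (fun x => pvEmit ty tx th tw y x) = [] := by
        rw [List.flatMap_eq_nil_iff]
        intro x hxm
        rw [PySem.List.mem_pyRange_one] at hxm
        simp only [pvEmit]
        split_ifs <;> first | rfl | (exfalso; omega)
      rw [hz]
      simp only [List.flatMap_cons, List.flatMap_nil, List.nil_append, List.append_nil, pvEmit]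
      split_ifs <;> first | rfl | (exfalso; omega)
    simp only [hinner]
    rw [flatMap_ite_singleton (fun y => ty ≤ y ∧ y < ty + th), filter_pyRange]
  · -- to-room to the left: only direction (0,-1) at column fx fires
    have hsplit : PySem.List.pyRange fx (fx + fw) 1
        = fx :: PySem.List.pyRange (fx + 1) (fx + fw) 1 :=
      PySem.List.pyRange_one_cons (by omega)
    have hinner : ∀ y : Int, (PySem.List.pyRange fx (fx + fw) 1).flatMap
        (fun x => pvEmit ty tx th tw y x)
        = if ty ≤ y ∧ y < ty + th then [(y, fx, (0 : Int), (-1 : Int))] else [] := by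
      intro y
      rw [hsplit]
      have hz : (PySem.List.pyRange (fx + 1) (fx + fw) 1).flatMap
          (fun x => pvEmit ty tx th tw y x) = [] := by
        rw [List.flatMap_eq_nil_iff]
        intro x hxm
        rw [PySem.List.mem_pyRange_one] at hxm
        simp only [pvEmit]
        split_ifs <;> first | rfl | (exfalso; omega)
      rw [List.flatMap_cons, hz, List.append_nil]
      simp only [pvEmit]
      split_ifs <;> first | rfl | (exfalso; omega)
    simp only [hinner]
    rw [flatMap_ite_singleton (fun y => ty ≤ y ∧ y < ty + th), filter_pyRange]
  · -- to-room below: only direction (1,0) on row fy+fh-1 fires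
    have hsplit : PySem.List.pyRange fy (fy + fh) 1
        = PySem.List.pyRange fy (fy + fh - 1) 1 ++ [fy + fh - 1] := by
      have h := PySem.List.pyRange_one_succ_right (a := fy) (b := fy + fh - 1) (by omega)
      have e : fy + fh - 1 + 1 = fy + fh := by ring
      rwa [e] at h
    rw [hsplit, List.flatMap_append]
    have hz : (PySem.List.pyRange fy (fy + fh - 1) 1).flatMap
        (fun y => (PySem.List.pyRange fx (fx + fw) 1).flatMap
          (fun x => pvEmit ty tx th tw y x)) = [] := by
      rw [List.flatMap_eq_nil_iff]
      intro y hym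
      rw [PySem.List.mem_pyRange_one] at hym
      rw [List.flatMap_eq_nil_iff]
      intro x _
      simp only [pvEmit]
      split_ifs <;> first | rfl | (exfalso; omega)
    have hrow : (PySem.List.pyRange fx (fx + fw) 1).flatMap
        (fun x => pvEmit ty tx th tw (fy + fh - 1) x)
        = (PySem.List.pyRange fx (fx + fw) 1).flatMap
            (fun x => if tx ≤ x ∧ x < tx + tw then [(fy + fh - 1, x, (1 : Int), (0 : Int))] else []) := by
      apply List.flatMap_congr
      intro x _
      simp only [pvEmit]
      split_ifs <;> first | rfl | (exfalso; omega)
    rw [hz]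
    simp only [List.flatMap_cons, List.flatMap_nil, List.nil_append, List.append_nil]
    rw [hrow, flatMap_ite_singleton (fun x => tx ≤ x ∧ x < tx + tw), filter_pyRange]
  · -- to-room above: only direction (-1,0) on row fy fires
    have hsplit : PySem.List.pyRange fy (fy + fh) 1
        = fy :: PySem.List.pyRange (fy + 1) (fy + fh) 1 :=
      PySem.List.pyRange_one_cons (by omega)
    rw [hsplit]
    have hz : (PySem.List.pyRange (fy + 1) (fy + fh) 1).flatMap
        (fun y => (PySem.List.pyRange fx (fx + fw) 1).flatMap
          (fun x => pvEmit ty tx th tw y x)) = [] := by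
      rw [List.flatMap_eq_nil_iff]
      intro y hym
      rw [PySem.List.mem_pyRange_one] at hym
      rw [List.flatMap_eq_nil_iff]
      intro x _
      simp only [pvEmit]
      split_ifs <;> first | rfl | (exfalso; omega)
    have hrow : (PySem.List.pyRange fx (fx + fw) 1).flatMap
        (fun x => pvEmit ty tx th tw fy x)
        = (PySem.List.pyRange fx (fx + fw) 1).flatMap
            (fun x => if tx ≤ x ∧ x < tx + tw then [(fy, x, (-1 : Int), (0 : Int))] else []) := by
      apply List.flatMap_congr
      intro x _
      simp only [pvEmit]
      split_ifs <;> first | rfl | (exfalso; omega)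
    simp only [List.flatMap_cons, hz, List.append_nil]
    rw [hrow, flatMap_ite_singleton (fun x => tx ≤ x ∧ x < tx + tw), filter_pyRange]
  · omega

-- a degenerate room (some non-positive dimension) yields no scanned boundary cells
lemma alt_degenerate (fy fx fh fw ty tx th tw : Int)
    (hdeg : fh ≤ 0 ∨ fw ≤ 0 ∨ th ≤ 0 ∨ tw ≤ 0) :
    find_adjacent_cells_alt fy fx fh fw ty tx th tw = [] := by
  by_cases hadj : tx - fx = fw ∨ tx - fx = -tw ∨ ty - fy = fh ∨ ty - fy = -th
  case neg => unfold find_adjacent_cells_alt; rw [if_pos (by exact hadj)]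
  rw [alt_eq_flatMap _ _ _ _ _ _ _ _ hadj, List.flatMap_eq_nil_iff]
  intro y hy
  rw [PySem.List.mem_pyRange_one] at hy
  rw [List.flatMap_eq_nil_iff]
  intro x hx
  rw [PySem.List.mem_pyRange_one] at hx
  simp only [pvEmit]
  split_ifs <;> first | rfl | (exfalso; omega)

-- ===== VERDICT (by name: the statements are the Claim_ definitions above) =====
theorem find_adjacent_cells_spec : Claim_unchanged_find_adjacent_cells := by
  intro fy fx fh fw ty tx th tw _ hpre
  unfold Spec_find_adjacent_cells
  intro hnD
  by_cases hpos : 1 ≤ fh ∧ 1 ≤ fw ∧ 1 ≤ th ∧ 1 ≤ tw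
  · exact eq_of_pos fy fx fh fw ty tx th tw hpre hpos.1 hpos.2.1 hpos.2.2.1 hpos.2.2.2
  · rw [alt_degenerate fy fx fh fw ty tx th tw (by omega)]
    unfold Pre_find_adjacent_cells at hpre
    unfold D_find_adjacent_cells at hnD
    unfold find_adjacent_cells
    dsimp only
    split_ifs at hnD with hc <;>
      (split_ifs with h1 h2 h3 h4 <;>
        first
        | rw [PySem.List.pyRange_one_eq_nil (by omega), List.map_nil]
        | omega)

theorem find_adjacent_cells_changed : Claim_changed_find_adjacent_cells := by
  unfold Claim_changed_find_adjacent_cells; decide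

theorem find_adjacent_cells_tight : Claim_exact_find_adjacent_cells := by
  intro fy fx fh fw ty tx th tw _ hpre hD
  unfold Pre_find_adjacent_cells at hpre
  unfold D_find_adjacent_cells at hD
  split_ifs at hD with hc <;>
    (rw [alt_degenerate fy fx fh fw ty tx th tw (by omega)]
     unfold find_adjacent_cells
     dsimp only
     split_ifs with h1 h2 h3 h4 <;>
       first
       | (rw [PySem.List.pyRange_one_cons (by omega)]; simp)
       | omega)
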